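-- pv_equiv track=rewrite | github.com/TomCarton/AdventOfCode | 2020/day11/day11.py | compute
-- ===== SOURCE A (Python) =====
-- import itertools
--
-- surroundings = [(i, j) for i, j in itertools.product(range(-1, 2), repeat = 2) if (i != 0 or j != 0)]
--
-- def countSeats(seats, row, col, visible):
--     count = 0
--
--     for i, j in surroundings:
--         x = col + i
--         y = row + j
--
--         if visible:
--             while 0 <= y < len(seats) and 0 <= x < len(seats[y]):
--                 if seats[y][x] == '.':
--                     x += i
--                     y += j
--                 elif seats[y][x] == "#":
--                     count += 1
--                     break
--                 else:
--                     break
--         else: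
--             if 0 <= row + j < len(seats) and 0 <= col + i < len(seats[row + j]):
--                 if seats[row + j][col + i] == "#":
--                     count += 1
--
--     return count
--
-- def compute(seats, tolerance, visible):
--     prev = []
--
--     while prev != seats:
--         prev = seats[:]
--         seats = []
--
--         for row, y in enumerate(prev):
--             line = ""
--
--             for col, x in enumerate(y):
--                 neighbors = countSeats(prev, row, col, visible)
--
--                 if x == 'L':
--                     line += '#' if neighbors == 0 else 'L'
--                 elif x == '#':
--                     line += 'L' if neighbors >= tolerance else '#'
--                 else:
--                     line += x
--
--             seats.append(line)
--
--     return list(itertools.chain(*seats)).count('#')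
-- ===== SOURCE B (Python) =====
-- def compute(seats, tolerance, visible):
--     grid = [list(row) for row in seats]
--     height = len(grid)
--     dirs = [(-1, -1), (0, -1), (1, -1), (-1, 0), (1, 0), (-1, 1), (0, 1), (1, 1)]  # (dy, dx)
--     # Static adjacency index, traced ONCE on the initial grid: cells never switch between
--     # '.' and non-'.' (nor between seat 'L'/'#' and non-seat) and row lengths never change,
--     # so each seat's visible (or adjacent) neighbour coordinates are the same in every
--     # generation.  Non-seat cells never need a count, so they get no list at all.
--     nbrs = []
--     for y, row in enumerate(grid):
--         rown = []
--         for x in range(len(row)):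
--             cell = []
--             if row[x] == 'L' or row[x] == '#':
--                 for dy, dx in dirs:
--                     ny, nx = y + dy, x + dx
--                     if visible:
--                         while 0 <= ny < height and 0 <= nx < len(grid[ny]):
--                             if grid[ny][nx] != '.':
--                                 cell.append((ny, nx))
--                                 break
--                             ny += dy
--                             nx += dx
--                     else:
--                         if 0 <= ny < height and 0 <= nx < len(grid[ny]):
--                             cell.append((ny, nx))
--             rown.append(cell)
--         nbrs.append(rown)
--
--     def new_state(c, cell):
--         if c == 'L':
--             return '#' if sum(1 for ny, nx in cell if grid[ny][nx] == '#') == 0 else 'L'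
--         if c == '#':
--             return 'L' if sum(1 for ny, nx in cell if grid[ny][nx] == '#') >= tolerance else '#'
--         return c
--
--     while True:
--         nxt = [[new_state(c, cell) for c, cell in zip(row, rown)]
--                for row, rown in zip(grid, nbrs)]
--         if nxt == grid:
--             break
--         grid = nxt
--     return sum(row.count('#') for row in grid)
-- ===== Notes on version B (the rewrite author's own statement) =====
-- stated objective: faster
-- what changed: B traces the 8 neighbour rays once on the initial grid to build a static per-cell adjacency index (valid because '.'-cells and row lengths never change between generations), then runs each generation as a pure lookup pass over that index instead of re-tracing every ray for every cell of every generation as A does.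
import Mathlib
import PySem

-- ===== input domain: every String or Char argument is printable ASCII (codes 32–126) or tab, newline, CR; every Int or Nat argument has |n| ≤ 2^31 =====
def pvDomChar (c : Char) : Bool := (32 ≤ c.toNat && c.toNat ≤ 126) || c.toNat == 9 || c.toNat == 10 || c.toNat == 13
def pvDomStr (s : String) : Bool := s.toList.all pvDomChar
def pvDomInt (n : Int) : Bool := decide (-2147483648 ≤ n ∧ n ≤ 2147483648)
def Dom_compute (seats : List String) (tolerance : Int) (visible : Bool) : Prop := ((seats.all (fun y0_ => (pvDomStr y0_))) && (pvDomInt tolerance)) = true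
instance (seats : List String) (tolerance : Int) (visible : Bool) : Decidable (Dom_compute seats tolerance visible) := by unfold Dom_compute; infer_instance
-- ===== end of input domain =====

-- B precomputes each cell's neighbour coordinates once on the initial grid (the 8 rays for
-- visible, the 8 adjacent cells otherwise) and replays the generations over that static index
-- instead of re-tracing the rays for every cell of every generation (objective: faster).

-- ===== PORT A =====
-- fuel for the inner ray walk: the walk stays in bounds and moves strictly in one
-- coordinate each step, so (height + total cells + 2) ticks always suffice
def rayFuelA (g : List (List Char)) : Nat :=
  g.length + g.foldl (fun a r => a + r.length) 0 + 2

-- fuel for the generation loop (shared by both ports): one tick per comparison.  Each cell only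
-- ever oscillates between at most two values ('L'/'#'; every other character is fixed), so
-- at most 2^cells distinct grids can occur before the sequence cycles; hence whenever the
-- Python loop terminates it does so within 2^cells + 3 comparisons and this fuel is exact.
-- (When the Python loop never terminates — e.g. ["LL"] with tolerance 1 oscillates forever —
-- A returns nothing at all and nothing is claimed about that input's value.)
def outerFuel (g : List (List Char)) : Nat :=
  2 ^ (g.foldl (fun a r => a + r.length) 0) + 3

def surroundings : List (Int × Int) :=
  ((PySem.List.pyRange (-1) 2 1).flatMap
      (fun i => (PySem.List.pyRange (-1) 2 1).map (fun j => (i, j)))).filter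
    (fun p => !(p.1 == 0 && p.2 == 0))

-- the inner `while 0 <= y < len(seats) and 0 <= x < len(seats[y])` ray walk of countSeats
def rayA (g : List (List Char)) (i j : Int) : Nat → Int → Int → Int
  | 0, _, _ => 0
  | f + 1, x, y =>
    if 0 ≤ y ∧ y < (g.length : Int) then
      match PySem.List.pyGet? g y with
      | none => 0
      | some row =>
        if 0 ≤ x ∧ x < (row.length : Int) then
          match PySem.List.pyGet? row x with
          | none => 0
          | some c =>
            if c = '.' then rayA g i j f (x + i) (y + j)
            else if c = '#' then 1 else 0
        else 0
    else 0

def countSeatsA (g : List (List Char)) (row col : Int) (visible : Bool) : Int :=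
  surroundings.foldl (fun count p =>
    if visible then
      count + rayA g p.1 p.2 (rayFuelA g) (col + p.1) (row + p.2)
    else
      if 0 ≤ row + p.2 ∧ row + p.2 < (g.length : Int) then
        match PySem.List.pyGet? g (row + p.2) with
        | none => count
        | some r =>
          if 0 ≤ col + p.1 ∧ col + p.1 < (r.length : Int) then
            match PySem.List.pyGet? r (col + p.1) with
            | none => count
            | some c => if c = '#' then count + 1 else count
          else count
      else count
    ) 0

def stepA (t : Int) (v : Bool) (g : List (List Char)) : List (List Char) :=
  (PySem.List.enumerate g).map (fun ry =>
    (PySem.List.enumerate ry.2).map (fun cx =>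
      let n := countSeatsA g ry.1 cx.1 v
      if cx.2 = 'L' then (if n = 0 then '#' else 'L')
      else if cx.2 = '#' then (if n ≥ t then 'L' else '#')
      else cx.2))

def loopA (t : Int) (v : Bool) : Nat → List (List Char) → List (List Char) → List (List Char)
  | 0, _, g => g
  | f + 1, prev, g => if prev = g then g else loopA t v f g (stepA t v g)

def compute (seats : List String) (tolerance : Int) (visible : Bool) : Int :=
  let g := seats.map (fun s => s.toList)
  let final := loopA tolerance visible (outerFuel g) [] g
  (final.flatten.count '#' : Int)

-- ===== PORT B =====
def dirsB : List (Int × Int) :=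
  [(-1, -1), (0, -1), (1, -1), (-1, 0), (1, 0), (-1, 1), (0, 1), (1, 1)]

-- first non-'.' in-bounds cell along the ray, on the INITIAL grid
def rayB (g : List (List Char)) (dy dx : Int) : Nat → Int → Int → Option (Int × Int)
  | 0, _, _ => none
  | f + 1, ny, nx =>
    if 0 ≤ ny ∧ ny < (g.length : Int) then
      match PySem.List.pyGet? g ny with
      | none => none
      | some row =>
        if 0 ≤ nx ∧ nx < (row.length : Int) then
          match PySem.List.pyGet? row nx with
          | none => none
          | some c =>
            if c ≠ '.' then some (ny, nx) else rayB g dy dx f (ny + dy) (nx + dx)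
        else none
    else none

def cellNbrs (g : List (List Char)) (visible : Bool) (y x : Int) : List (Int × Int) :=
  dirsB.foldl (fun cell d =>
    if visible then
      match rayB g d.1 d.2 (rayFuelA g) (y + d.1) (x + d.2) with
      | some p => cell ++ [p]
      | none => cell
    else
      if 0 ≤ y + d.1 ∧ y + d.1 < (g.length : Int) then
        match PySem.List.pyGet? g (y + d.1) with
        | none => cell
        | some row =>
          if 0 ≤ x + d.2 ∧ x + d.2 < (row.length : Int) then cell ++ [(y + d.1, x + d.2)]
          else cell
      else cell
    ) []

-- only seat cells ('L'/'#' on the initial grid) get a neighbour list; others get []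
def buildNbrs (g : List (List Char)) (visible : Bool) : List (List (List (Int × Int))) :=
  (PySem.List.enumerate g).foldl (fun nbrs ry =>
    nbrs ++ [(PySem.List.pyRange 0 ry.2.length 1).map (fun x =>
      match PySem.List.pyGet? ry.2 x with
      | some c => if c = 'L' ∨ c = '#' then cellNbrs g visible ry.1 x else []
      | none => [])]) []

def cellAt (g : List (List Char)) (y x : Int) : Option Char :=
  (PySem.List.pyGet? g y).bind (fun r => PySem.List.pyGet? r x)

def occCount (g : List (List Char)) (cell : List (Int × Int)) : Int :=
  cell.foldl (fun n p => if cellAt g p.1 p.2 = some '#' then n + 1 else n) 0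

-- Source B's new_state: the occupied-neighbour count is only computed for seat cells
def newCell (t : Int) (g : List (List Char)) (c : Char) (cell : List (Int × Int)) : Char :=
  if c = 'L' then (if occCount g cell = 0 then '#' else 'L')
  else if c = '#' then (if occCount g cell ≥ t then 'L' else '#')
  else c

def stepB (t : Int) (g : List (List Char)) (nbrs : List (List (List (Int × Int)))) :
    List (List Char) :=
  (g.zip nbrs).map (fun rp =>
    (rp.1.zip rp.2).map (fun cp => newCell t g cp.1 cp.2))

def loopB (t : Int) (nbrs : List (List (List (Int × Int)))) :
    Nat → List (List Char) → List (List Char)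
  | 0, g => g
  | f + 1, g =>
    let nxt := stepB t g nbrs
    if nxt = g then g else loopB t nbrs f nxt

def compute_alt (seats : List String) (tolerance : Int) (visible : Bool) : Int :=
  let g := seats.map (fun s => s.toList)
  let nbrs := buildNbrs g visible
  let final := loopB tolerance nbrs (outerFuel g) g
  (final.map (fun r => (r.count '#' : Int))).sum

-- ===== PRECONDITION & SPEC =====
def Spec_compute (seats : List String) (tolerance : Int) (visible : Bool) (out : Int) : Prop := out = compute_alt seats tolerance visible
instance (seats : List String) (tolerance : Int) (visible : Bool) (out : Int) : Decidable (Spec_compute seats tolerance visible out) := by unfold Spec_compute; infer_instance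

-- ===== CLAIM (what is proved, stated in full; the proofs are below) =====
def Claim_equal_compute : Prop := ∀ (seats : List String) (tolerance : Int) (visible : Bool), Dom_compute seats tolerance visible → Spec_compute seats tolerance visible (compute seats tolerance visible)

-- ===== LEMMAS AND PROOFS =====

-- the class of a cell: floor '.' (rays pass), seat 'L'/'#' (dynamic), anything else (inert
-- blocker).  A cell's class never changes from one generation to the next, and classes (plus
-- row lengths) are all that the ray walk, the bounds checks and the seat test depend on.
def classOf (c : Char) : Nat :=
  if c == '.' then 0 else if c == 'L' || c == '#' then 1 else 2

def pvMask (g : List (List Char)) : List (List Nat) :=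
  g.map (fun r => r.map classOf)

-- per-direction contribution of A's countSeats fold
def dirA (g : List (List Char)) (v : Bool) (row col : Int) (p : Int × Int) : Int :=
  if v then rayA g p.1 p.2 (rayFuelA g) (col + p.1) (row + p.2)
  else
    if 0 ≤ row + p.2 ∧ row + p.2 < (g.length : Int) then
      match PySem.List.pyGet? g (row + p.2) with
      | none => 0
      | some r =>
        if 0 ≤ col + p.1 ∧ col + p.1 < (r.length : Int) then
          match PySem.List.pyGet? r (col + p.1) with
          | none => 0
          | some c => if c = '#' then 1 else 0
        else 0
    else 0

-- per-direction coordinates appended by B's cellNbrs fold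
def dirB (g : List (List Char)) (v : Bool) (y x : Int) (d : Int × Int) : List (Int × Int) :=
  if v then
    match rayB g d.1 d.2 (rayFuelA g) (y + d.1) (x + d.2) with
    | some p => [p]
    | none => []
  else
    if 0 ≤ y + d.1 ∧ y + d.1 < (g.length : Int) then
      match PySem.List.pyGet? g (y + d.1) with
      | none => []
      | some row =>
        if 0 ≤ x + d.2 ∧ x + d.2 < (row.length : Int) then [(y + d.1, x + d.2)] else []
    else []

theorem surroundings_eq :
    surroundings = (dirsB.map (fun d => (d.2, d.1))) := by decide

theorem countSeatsA_eq_sum (g : List (List Char)) (row col : Int) (v : Bool) :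
    countSeatsA g row col v = (surroundings.map (dirA g v row col)).sum := by
  unfold countSeatsA
  rw [PySem.List.foldl_congr_mem surroundings _ (fun count p => count + dirA g v row col p) 0 ?_]
  · rw [PySem.List.foldl_add]; simp
  · intro acc p _
    unfold dirA
    cases v
    · simp only [Bool.false_eq_true, if_false]
      by_cases h1 : 0 ≤ row + p.2 ∧ row + p.2 < (g.length : Int)
      · simp only [h1, if_true]
        cases hg : PySem.List.pyGet? g (row + p.2) with
        | none => simp
        | some r =>
          by_cases h2 : 0 ≤ col + p.1 ∧ col + p.1 < (r.length : Int)
          · simp only [h2, if_true]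
            cases hc : PySem.List.pyGet? r (col + p.1) with
            | none => simp
            | some c => by_cases h3 : c = '#' <;> simp [h3]
          · simp [h2]
      · simp [h1]
    · simp

theorem cellNbrs_eq (g : List (List Char)) (v : Bool) (y x : Int) :
    cellNbrs g v y x = dirsB.flatMap (dirB g v y x) := by
  unfold cellNbrs
  rw [PySem.List.foldl_congr_mem dirsB _ (fun cell d => cell ++ dirB g v y x d) [] ?_]
  · rw [PySem.List.foldl_append_eq_flatMap]; simp
  · intro acc d _
    unfold dirB
    cases v
    · simp only [Bool.false_eq_true, if_false]
      by_cases h1 : 0 ≤ y + d.1 ∧ y + d.1 < (g.length : Int)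
      · simp only [h1, if_true]
        cases hg : PySem.List.pyGet? g (y + d.1) with
        | none => simp
        | some r => by_cases h2 : 0 ≤ x + d.2 ∧ x + d.2 < (r.length : Int) <;> simp [h2]
      · simp [h1]
    · simp only [if_true]
      cases hr : rayB g d.1 d.2 (rayFuelA g) (y + d.1) (x + d.2) <;> simp

theorem occCount_countP (g : List (List Char)) (l : List (Int × Int)) :
    occCount g l = ((l.countP (fun q => decide (cellAt g q.1 q.2 = some '#'))) : Int) := by
  unfold occCount
  rw [PySem.List.foldl_ite_add_one (fun q => cellAt g q.1 q.2 = some '#') l 0]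
  simp

-- facts extracted from equality of masks
theorem mask_len {g g0 : List (List Char)} (hm : pvMask g = pvMask g0) :
    g.length = g0.length := by
  have := congrArg List.length hm
  simpa [pvMask] using this

theorem mask_row {g g0 : List (List Char)} (hm : pvMask g = pvMask g0)
    {y : Int} (h0 : 0 ≤ y) (h1 : y < (g.length : Int)) :
    ∃ r r0, PySem.List.pyGet? g y = some r ∧ PySem.List.pyGet? g0 y = some r0 ∧
      r.map (classOf) = r0.map (classOf) := by
  have hlt : y.toNat < g.length := by omega
  have hlt0 : y.toNat < g0.length := by rw [← mask_len hm]; exact hlt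
  refine ⟨g[y.toNat], g0[y.toNat], PySem.List.pyGet?_eq_some_getElem g h0 h1,
    PySem.List.pyGet?_eq_some_getElem g0 h0 (by rw [← mask_len hm] at *; omega), ?_⟩
  have := congrArg (fun l => l[y.toNat]?) hm
  simp only [pvMask, List.getElem?_map] at this
  rw [List.getElem?_eq_getElem hlt, List.getElem?_eq_getElem hlt0] at this
  simpa using this

theorem mask_rowlen {r r0 : List Char}
    (h : r.map (classOf) = r0.map (classOf)) :
    r.length = r0.length := by
  have := congrArg List.length h
  simpa using this

theorem mask_cell {r r0 : List Char}
    (h : r.map (classOf) = r0.map (classOf))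
    {x : Int} (h0 : 0 ≤ x) (h1 : x < (r.length : Int)) :
    ∃ c c0, PySem.List.pyGet? r x = some c ∧ PySem.List.pyGet? r0 x = some c0 ∧
      classOf c = classOf c0 := by
  have hlt : x.toNat < r.length := by omega
  have hlt0 : x.toNat < r0.length := by rw [← mask_rowlen h]; exact hlt
  refine ⟨r[x.toNat], r0[x.toNat], PySem.List.pyGet?_eq_some_getElem r h0 h1,
    PySem.List.pyGet?_eq_some_getElem r0 h0 (by rw [← mask_rowlen h] at *; omega), ?_⟩
  have := congrArg (fun l => l[x.toNat]?) h
  simp only [List.getElem?_map] at this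
  rw [List.getElem?_eq_getElem hlt, List.getElem?_eq_getElem hlt0] at this
  simpa using this

theorem classOf_zero_iff (c c0 : Char) (h : classOf c = classOf c0) :
    c = '.' ↔ c0 = '.' := by
  unfold classOf at h
  constructor <;> intro hc <;> subst hc <;> revert h <;>
    simp only [beq_iff_eq, Bool.or_eq_true] <;> split_ifs <;> simp_all

theorem classOf_seat_iff (c c0 : Char) (h : classOf c = classOf c0) :
    c = 'L' ∨ c = '#' ↔ c0 = 'L' ∨ c0 = '#' := by
  unfold classOf at h
  constructor <;> intro hc <;>
    [ (rcases hc with hc | hc) ; (rcases hc with hc | hc) ] <;> subst hc <;> revert h <;>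
    simp only [beq_iff_eq, Bool.or_eq_true] <;> split_ifs <;> simp_all

theorem foldl_len (l : List (List Char)) (n : Nat) :
    l.foldl (fun a r => a + r.length) n = n + (l.map List.length).sum := by
  induction l generalizing n with
  | nil => simp
  | cons r t ih => simp [List.foldl_cons, ih, List.sum_cons]; omega

theorem mask_fuel {g g0 : List (List Char)} (hm : pvMask g = pvMask g0) :
    rayFuelA g = rayFuelA g0 := by
  have h1 : g.map List.length = g0.map List.length := by
    have h := congrArg (fun l => l.map List.length) hm
    simp only [pvMask, List.map_map] at h
    simpa [Function.comp_def, List.length_map] using h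
  unfold rayFuelA
  rw [foldl_len, foldl_len, h1, mask_len hm]

theorem ray_eq {g g0 : List (List Char)} (hm : pvMask g = pvMask g0) (i j : Int) :
    ∀ (f : Nat) (x y : Int),
      rayA g i j f x y =
        (match rayB g0 j i f y x with
         | none => 0
         | some p => if cellAt g p.1 p.2 = some '#' then (1 : Int) else 0) := by
  intro f
  induction f with
  | zero => intro x y; rfl
  | succ f ih =>
    intro x y
    show (if 0 ≤ y ∧ y < (g.length : Int) then _ else 0) = _
    by_cases hy : 0 ≤ y ∧ y < (g.length : Int)
    · obtain ⟨r, r0, hr, hr0, hrm⟩ := mask_row hm hy.1 hy.2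
      have hy0 : 0 ≤ y ∧ y < (g0.length : Int) := by
        rw [← mask_len hm]; exact hy
      rw [rayB]
      simp only [hy, hy0, if_true, hr, hr0]
      by_cases hx : 0 ≤ x ∧ x < (r.length : Int)
      · have hx0 : 0 ≤ x ∧ x < (r0.length : Int) := by rw [← mask_rowlen hrm]; exact hx
        obtain ⟨c, c0, hc, hc0, hcm⟩ := mask_cell hrm hx.1 hx.2
        simp only [hx, hx0, if_true, hc, hc0]
        by_cases hdot : c = '.'
        · have hdot0 : c0 = '.' := (classOf_zero_iff c c0 hcm).mp hdot
          simp only [hdot, hdot0, if_true, ne_eq, not_true_eq_false, if_false]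
          exact ih (x + i) (y + j)
        · have hdot0 : ¬ c0 = '.' := fun h => hdot ((classOf_zero_iff c c0 hcm).mpr h)
          simp only [hdot, if_false, ne_eq, hdot0, not_false_eq_true, if_true]
          have hcell : cellAt g y x = some c := by
            unfold cellAt; rw [hr]; simpa using hc
          by_cases h3 : c = '#' <;> simp [hcell, h3]
      · have hx0 : ¬ (0 ≤ x ∧ x < (r0.length : Int)) := by rw [← mask_rowlen hrm]; exact hx
        simp [hx, hx0]
    · have hy0 : ¬ (0 ≤ y ∧ y < (g0.length : Int)) := by rw [← mask_len hm]; exact hy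
      rw [rayB]
      simp [hy, hy0]

theorem dir_core {g g0 : List (List Char)} (hm : pvMask g = pvMask g0)
    (v : Bool) (y x i j : Int) :
    dirA g v y x (i, j) =
      ((dirB g0 v y x (j, i)).countP (fun q => decide (cellAt g q.1 q.2 = some '#')) : Int) := by
  unfold dirA dirB
  cases v
  · simp only [Bool.false_eq_true, if_false]
    by_cases h1 : 0 ≤ y + j ∧ y + j < (g.length : Int)
    · have h10 : 0 ≤ y + j ∧ y + j < (g0.length : Int) := by rw [← mask_len hm]; exact h1
      obtain ⟨r, r0, hr, hr0, hrm⟩ := mask_row hm h1.1 h1.2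
      simp only [h1, h10, if_true, hr, hr0]
      by_cases h2 : 0 ≤ x + i ∧ x + i < (r.length : Int)
      · have h20 : 0 ≤ x + i ∧ x + i < (r0.length : Int) := by rw [← mask_rowlen hrm]; exact h2
        obtain ⟨c, c0, hc, hc0, _⟩ := mask_cell hrm h2.1 h2.2
        have hcell : cellAt g (y + j) (x + i) = some c := by
          unfold cellAt; rw [hr]; simpa using hc
        simp only [h2, h20, if_true, hc, List.countP_cons, List.countP_nil]
        by_cases h3 : c = '#' <;> simp [hcell, h3]
      · have h20 : ¬ (0 ≤ x + i ∧ x + i < (r0.length : Int)) := by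
          rw [← mask_rowlen hrm]; exact h2
        simp [h2, h20]
    · have h10 : ¬ (0 ≤ y + j ∧ y + j < (g0.length : Int)) := by rw [← mask_len hm]; exact h1
      simp [h1, h10]
  · simp only [if_true]
    rw [mask_fuel hm, ray_eq hm i j (rayFuelA g0) (x + i) (y + j)]
    cases hr : rayB g0 j i (rayFuelA g0) (y + j) (x + i) with
    | none => simp
    | some p =>
      simp only [List.countP_cons, List.countP_nil]
      by_cases h3 : cellAt g p.1 p.2 = some '#' <;> simp [h3]

theorem count_eq_occ {g g0 : List (List Char)} (hm : pvMask g = pvMask g0)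
    (v : Bool) (y x : Int) :
    occCount g (cellNbrs g0 v y x) = countSeatsA g y x v := by
  rw [cellNbrs_eq, occCount_countP, countSeatsA_eq_sum, surroundings_eq]
  induction dirsB with
  | nil => rfl
  | cons d t ih =>
    simp only [List.map_cons, List.sum_cons, List.flatMap_cons, List.countP_append]
    rw [Nat.cast_add, ih]
    congr 1
    exact (dir_core hm v y x d.2 d.1).symm

theorem mask_row_get {g g0 : List (List Char)} (hm : pvMask g = pvMask g0)
    (k : Nat) (hk : k < g.length) (hk0 : k < g0.length) :
    g[k].map (classOf) = g0[k].map (classOf) := by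
  have := congrArg (fun l => l[k]?) hm
  simp only [pvMask, List.getElem?_map] at this
  rw [List.getElem?_eq_getElem hk, List.getElem?_eq_getElem hk0] at this
  simpa using this

theorem buildNbrs_eq (g : List (List Char)) (v : Bool) :
    buildNbrs g v = (PySem.List.enumerate g).map (fun ry =>
      (PySem.List.pyRange 0 (ry.2.length : Int) 1).map (fun x =>
        match PySem.List.pyGet? ry.2 x with
        | some c => if c = 'L' ∨ c = '#' then cellNbrs g v ry.1 x else []
        | none => [])) := by
  unfold buildNbrs
  rw [PySem.List.foldl_append_singleton_eq_map]
  simp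

theorem pyRange_len (n : Nat) : (PySem.List.pyRange 0 (n : Int) 1).length = n := by
  rw [PySem.List.pyRange_zero_natCast]; simp

theorem pyRange_get (n : Nat) (x : Nat) (hx : x < (PySem.List.pyRange 0 (n : Int) 1).length) :
    (PySem.List.pyRange 0 (n : Int) 1)[x] = (x : Int) := by
  rw [pyRange_len] at hx
  simp [PySem.List.pyRange_zero_natCast, hx]

theorem step_eq {g g0 : List (List Char)} (hm : pvMask g = pvMask g0) (t : Int) (v : Bool) :
    stepB t g (buildNbrs g0 v) = stepA t v g := by
  have hlen := mask_len hm
  rw [buildNbrs_eq]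
  apply List.ext_getElem
  · simp [stepB, stepA, PySem.List.length_enumerate, List.length_zip, hlen]
  intro k hk1 hk2
  have hkg : k < g.length := by
    simpa [stepB, List.length_zip, PySem.List.length_enumerate, hlen] using hk1
  have hkg0 : k < g0.length := by omega
  have hrlen : g[k].length = g0[k].length := by
    have := congrArg List.length (mask_row_get hm k hkg hkg0)
    simpa using this
  simp only [stepB, stepA, List.getElem_map, List.getElem_zip, PySem.List.getElem_enumerate]
  apply List.ext_getElem
  · simp [List.length_zip, PySem.List.length_enumerate, pyRange_len, hrlen]
  intro x hx1 hx2
  have hxg : x < g[k].length := by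
    simpa [List.length_zip, pyRange_len, hrlen] using hx1
  have hxg0 : x < g0[k].length := by omega
  have hcls : classOf (g[k])[x] = classOf (g0[k])[x] := by
    have := congrArg (fun l => l[x]?) (mask_row_get hm k hkg hkg0)
    simp only [List.getElem?_map] at this
    rw [List.getElem?_eq_getElem hxg, List.getElem?_eq_getElem hxg0] at this
    simpa using this
  simp only [List.getElem_zip, List.getElem_map, PySem.List.getElem_enumerate, pyRange_get,
    zero_add, PySem.List.pyGet?_natCast, List.getElem?_eq_getElem hxg0]
  by_cases hseat : (g[k])[x] = 'L' ∨ (g[k])[x] = '#'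
  · rw [if_pos ((classOf_seat_iff _ _ hcls).mp hseat)]
    simp only [newCell]
    rw [count_eq_occ hm]
  · rw [if_neg (fun h0 => hseat ((classOf_seat_iff _ _ hcls).mpr h0))]
    push_neg at hseat
    simp [newCell, hseat.1, hseat.2]

theorem newState_class (c : Char) (n t : Int) :
    classOf (if c = 'L' then (if n = 0 then '#' else 'L')
      else if c = '#' then (if n ≥ t then 'L' else '#') else c) = classOf c := by
  by_cases h1 : c = 'L'
  · subst h1; split_ifs <;> decide
  · by_cases h2 : c = '#'
    · subst h2; split_ifs <;> decide
    · simp [h1, h2]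

theorem enum_map_snd {α β : Type} (g : List α) (F : α → β) :
    (PySem.List.enumerate g).map (fun ry => F ry.2) = g.map F := by
  have h := PySem.List.map_snd_enumerate g 0
  calc (PySem.List.enumerate g).map (fun ry => F ry.2)
      = ((PySem.List.enumerate g).map (fun ry => ry.2)).map F := by rw [List.map_map]; rfl
    _ = g.map F := by rw [h]

theorem mask_stepA (t : Int) (v : Bool) (g : List (List Char)) :
    pvMask (stepA t v g) = pvMask g := by
  unfold pvMask stepA
  rw [List.map_map]
  trans (PySem.List.enumerate g).map (fun ry => ry.2.map classOf)
  · apply List.map_congr_left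
    intro ry _
    simp only [Function.comp_def, List.map_map]
    trans (PySem.List.enumerate ry.2).map (fun cx => classOf cx.2)
    · apply List.map_congr_left
      intro cx _
      exact newState_class cx.2 (countSeatsA g ry.1 cx.1 v) t
    · exact enum_map_snd ry.2 classOf
  · exact enum_map_snd g (fun r => r.map classOf)

theorem loopA_self (t : Int) (v : Bool) (f : Nat) (g : List (List Char)) :
    loopA t v f g g = g := by
  cases f <;> simp [loopA]

theorem loopA_succ (t : Int) (v : Bool) (f : Nat) (prev g : List (List Char)) :
    loopA t v (f + 1) prev g = if prev = g then g else loopA t v f g (stepA t v g) := rfl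

theorem loopB_succ (t : Int) (nbrs : List (List (List (Int × Int)))) (f : Nat)
    (g : List (List Char)) :
    loopB t nbrs (f + 1) g =
      if stepB t g nbrs = g then g else loopB t nbrs f (stepB t g nbrs) := rfl

theorem loop_eq (t : Int) (v : Bool) (g0 : List (List Char)) :
    ∀ (f : Nat) (prev g : List (List Char)), pvMask g = pvMask g0 → prev ≠ g →
      loopA t v (f + 1) prev g = loopB t (buildNbrs g0 v) (f + 1) g := by
  intro f
  induction f with
  | zero =>
    intro prev g hm hne
    rw [loopA_succ, loopB_succ, if_neg hne, step_eq hm]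
    by_cases h : stepA t v g = g <;> simp [loopA, loopB, h]
  | succ f ih =>
    intro prev g hm hne
    rw [loopA_succ, loopB_succ, if_neg hne, step_eq hm]
    by_cases hs : stepA t v g = g
    · rw [hs, if_pos rfl]
      exact loopA_self t v (f + 1) g
    · rw [if_neg hs]
      exact ih g (stepA t v g) (by rw [mask_stepA]; exact hm) (fun h => hs h.symm)

theorem flatten_count (fin : List (List Char)) :
    ((fin.flatten.count '#' : Nat) : Int) = (fin.map (fun r => (r.count '#' : Int))).sum := by
  rw [List.count_flatten]
  induction fin with
  | nil => simp
  | cons r tl ih => simp only [List.map_cons, List.sum_cons, Nat.cast_add, ih]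

theorem main_g (t : Int) (v : Bool) (g : List (List Char)) :
    ((loopA t v (outerFuel g) [] g).flatten.count '#' : Int)
      = ((loopB t (buildNbrs g v) (outerFuel g) g).map (fun r => (r.count '#' : Int))).sum := by
  by_cases hg : g = []
  · subst hg; rfl
  · have h1 : outerFuel g = (outerFuel g - 1) + 1 := by
      have : 0 < outerFuel g := by unfold outerFuel; positivity
      omega
    rw [h1, loop_eq t v g (outerFuel g - 1) [] g rfl (fun h => hg h.symm)]
    rw [flatten_count]

theorem pv_main (seats : List String) (tolerance : Int) (visible : Bool) :
    compute seats tolerance visible = compute_alt seats tolerance visible := by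
  unfold compute compute_alt
  exact main_g tolerance visible (seats.map (fun s => s.toList))

-- ===== VERDICT (by name: the statement is the Claim_ definition above) =====
theorem compute_spec : Claim_equal_compute := by
  intro seats tolerance visible _
  exact pv_main seats tolerance visible
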